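-- pv_equiv track=rewrite | github.com/TheDrimo/cube64 | cube_solver.py | incrementer_liste
-- ===== SOURCE A (Python) =====
-- def incrementer_liste(listetotal, index=-1):
-- 	liste = listetotal[:index]
-- 	i = len(liste) - 1
-- 	while i >= 0:
-- 		if liste[i] < 3:
-- 			liste[i] += 1
-- 			break
-- 		else:
-- 			liste[i] = 0
-- 			i -= 1
-- 	return liste + listetotal[index:]
-- ===== SOURCE B (Python) =====
-- def incrementer_liste(listetotal, index=-1):
-- 	# single forward pass: pre = digits strictly before the last digit < 3 seen so far,
-- 	# piv = that digit's original value, tail = original digits after it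
-- 	pre = []
-- 	piv = None
-- 	tail = []
-- 	for d in listetotal[:index]:
-- 		if d < 3:
-- 			if piv is not None:
-- 				pre.append(piv)
-- 			pre.extend(tail)
-- 			piv = d
-- 			tail = []
-- 		else:
-- 			tail.append(d)
-- 	if piv is None:
-- 		prefix = [0] * len(tail)
-- 	else:
-- 		prefix = pre + [piv + 1] + [0] * len(tail)
-- 	return prefix + listetotal[index:]
-- ===== Notes on version B (the rewrite author's own statement) =====
-- stated objective: alternative
-- what changed: Replaces A's backward index-driven while loop that mutates the prefix in place and breaks at the first digit below 3 by a single forward left-to-right pass with an accumulator (pre, piv, tail) tracking the digits before the last sub-3 digit, that digit, and the digits after it, followed by one construction step; the input prefix is never mutated and no backward scan or break occurs.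
import Mathlib
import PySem

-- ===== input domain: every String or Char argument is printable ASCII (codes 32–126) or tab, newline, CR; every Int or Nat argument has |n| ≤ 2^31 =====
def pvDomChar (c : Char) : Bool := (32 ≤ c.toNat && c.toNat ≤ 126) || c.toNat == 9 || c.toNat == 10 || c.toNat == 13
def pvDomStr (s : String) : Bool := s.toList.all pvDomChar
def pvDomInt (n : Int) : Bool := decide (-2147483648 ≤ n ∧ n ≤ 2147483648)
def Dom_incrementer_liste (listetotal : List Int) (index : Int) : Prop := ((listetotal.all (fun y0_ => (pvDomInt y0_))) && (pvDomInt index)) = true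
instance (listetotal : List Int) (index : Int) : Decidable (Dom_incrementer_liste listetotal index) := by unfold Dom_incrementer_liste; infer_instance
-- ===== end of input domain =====

-- B replaces A's backward mutate-in-place while loop by a single forward pass with an
-- accumulator (pre, piv, tail) and one construction step — alternative traversal, same cost.

-- ===== PORT A =====
-- the while loop: i scans downward, zeroing digits ≥ 3 in place, incrementing and
-- breaking at the first digit < 3 (liste[i] is always in range when 0 ≤ i < len)
def pvLoopA (liste : List Int) (i : Int) : List Int :=
  if _h : 0 ≤ i then
    if PySem.List.pyGetD liste i 0 < 3 then
      liste.set i.toNat (PySem.List.pyGetD liste i 0 + 1)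
    else
      pvLoopA (liste.set i.toNat 0) (i - 1)
  else liste
termination_by (i + 1).toNat
decreasing_by omega

def incrementer_liste (listetotal : List Int) (index : Int) : List Int :=
  let liste := PySem.List.slice listetotal none (some index)
  pvLoopA liste ((liste.length : Int) - 1) ++ PySem.List.slice listetotal (some index) none

-- ===== PORT B =====
-- Source B's forward loop body: state (pre, piv, tail)
def pvStepB (s : List Int × Option Int × List Int) (d : Int) : List Int × Option Int × List Int :=
  if d < 3 then (s.1 ++ s.2.1.toList ++ s.2.2, some d, [])
  else (s.1, s.2.1, s.2.2 ++ [d])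

-- Source B's final construction of the new prefix from the loop state
def pvBuildB (s : List Int × Option Int × List Int) : List Int :=
  match s.2.1 with
  | none => List.replicate s.2.2.length 0
  | some p => (s.1 ++ [p + 1]) ++ List.replicate s.2.2.length 0

def incrementer_liste_alt (listetotal : List Int) (index : Int) : List Int :=
  let liste := PySem.List.slice listetotal none (some index)
  pvBuildB (liste.foldl pvStepB ([], none, [])) ++ PySem.List.slice listetotal (some index) none

-- ===== PRECONDITION & SPEC =====
def Spec_incrementer_liste (listetotal : List Int) (index : Int) (out : List Int) : Prop := out = incrementer_liste_alt listetotal index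
instance (listetotal : List Int) (index : Int) (out : List Int) : Decidable (Spec_incrementer_liste listetotal index out) := by unfold Spec_incrementer_liste; infer_instance

-- ===== CLAIM (what is proved, stated in full; the proofs are below) =====
def Claim_equal_incrementer_liste : Prop := ∀ (listetotal : List Int) (index : Int), Dom_incrementer_liste listetotal index → Spec_incrementer_liste listetotal index (incrementer_liste listetotal index)

-- ===== LEMMAS AND PROOFS =====

-- entries past position i are inert for A's loop
theorem pvLoopA_append (n : Nat) (ys zs : List Int) (i : Int)
    (hn : (i + 1).toNat = n) (hi : i < (ys.length : Int)) :
    pvLoopA (ys ++ zs) i = pvLoopA ys i ++ zs := by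
  induction n generalizing ys i with
  | zero =>
      have hneg : ¬ (0 ≤ i) := by omega
      conv_rhs => rw [pvLoopA.eq_def]
      rw [dif_neg hneg, pvLoopA.eq_def, dif_neg hneg]
  | succ n ih =>
      by_cases h0 : 0 ≤ i
      · have hlt : i.toNat < ys.length := by omega
        have hget : PySem.List.pyGetD (ys ++ zs) i 0 = PySem.List.pyGetD ys i 0 := by
          rw [PySem.List.pyGetD_eq_getElem _ _ h0 (by simp; omega),
              PySem.List.pyGetD_eq_getElem _ _ h0 hi]
          exact List.getElem_append_left hlt
        have hset : ∀ x, (ys ++ zs).set i.toNat x = ys.set i.toNat x ++ zs := by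
          intro x; exact List.set_append_left i.toNat x hlt
        rw [pvLoopA.eq_def, dif_pos h0, hget, hset]
        conv_rhs => rw [pvLoopA.eq_def, dif_pos h0]
        split
        · rfl
        · rw [hset 0, ih (ys.set i.toNat 0) (i - 1) (by omega) (by simp; omega)]
      · conv_rhs => rw [pvLoopA.eq_def]
        rw [dif_neg h0, pvLoopA.eq_def, dif_neg h0]

-- one step of A's loop at the last position, phrased on a snoc list
theorem pvLoopA_snoc (ys : List Int) (a : Int) :
    pvLoopA (ys ++ [a]) ((ys.length : Int)) =
      if a < 3 then ys ++ [a + 1] else pvLoopA ys ((ys.length : Int) - 1) ++ [0] := by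
  have h0 : (0:Int) ≤ (ys.length : Int) := by positivity
  have hget : PySem.List.pyGetD (ys ++ [a]) (ys.length : Int) 0 = a := by
    rw [PySem.List.pyGetD_eq_getElem _ _ h0 (by simp)]
    simp
  have htn : ((ys.length : Int)).toNat = ys.length := by omega
  rw [pvLoopA.eq_def, dif_pos h0, hget, htn]
  split
  · simp [List.set_append_right]
  · have hs : (ys ++ [a]).set ys.length 0 = ys ++ [0] := by
      rw [List.set_append_right ys.length 0 (le_refl _)]; simp
    rw [hs, pvLoopA_append ((ys.length : Int)).toNat ys [0] ((ys.length : Int) - 1) (by omega) (by omega)]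

-- B's forward fold reconstructs the prefix and its build equals A's backward loop
theorem pvFoldB_inv (ys : List Int) :
    (ys.foldl pvStepB ([], none, [])).1 ++ (ys.foldl pvStepB ([], none, [])).2.1.toList
        ++ (ys.foldl pvStepB ([], none, [])).2.2 = ys ∧
    pvBuildB (ys.foldl pvStepB ([], none, [])) = pvLoopA ys ((ys.length : Int) - 1) := by
  induction ys using List.reverseRecOn with
  | nil =>
      constructor
      · rfl
      · rw [pvLoopA.eq_def, dif_neg (by norm_num)]
        rfl
  | append_singleton ys a ih =>
      obtain ⟨horig, hbuild⟩ := ih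
      have hlen : ((ys ++ [a]).length : Int) - 1 = (ys.length : Int) := by simp
      rw [List.foldl_append] at *
      simp only [List.foldl_cons, List.foldl_nil]
      rw [hlen, pvLoopA_snoc]
      set s := ys.foldl pvStepB ([], none, []) with hs
      by_cases h : a < 3
      · have hstep : pvStepB s a = (ys, some a, []) := by
          simp [pvStepB, h, horig]
        refine ⟨?_, ?_⟩ <;> simp [hstep, pvBuildB, h]
      · have hstep : pvStepB s a = (s.1, s.2.1, s.2.2 ++ [a]) := by
          simp [pvStepB, h]
        constructor
        · rw [hstep]
          dsimp only
          simp only [← List.append_assoc]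
          rw [horig]
        · rw [hstep, ← hbuild]
          cases hp : s.2.1 <;> simp [pvBuildB, hp, h, List.replicate_succ']

-- ===== VERDICT (by name: the statement is the Claim_ definition above) =====
theorem incrementer_liste_spec : Claim_equal_incrementer_liste := by
  intro listetotal index _
  unfold Spec_incrementer_liste
  simp only [incrementer_liste, incrementer_liste_alt, (pvFoldB_inv _).2]
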